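-- pv_equiv track=rewrite | github.com/zorglub-champignac/PI_EULER | PGFusGen.py | Fus
-- ===== SOURCE A (Python) =====
-- def Fus(numx,powx,numy,powy):
--     if powx >= powy:
--         numa = numx + (numy << (powx - powy)) + (1 << powx)
--         powa = powx
--     else:
--         numa = (numx << (powy - powx)) + numy + (1 << powy)
--         powa = powy
--     powa += 1
--     while powa > 0 and (numa & 1) == 0:
--         numa >>= 1
--         powa -= 1
--     return (numa,powa)
-- ===== SOURCE B (Python) =====
-- def Fus(numx, powx, numy, powy):
--     powa = max(powx, powy)
--     numa = (numx << (powa - powx)) + (numy << (powa - powy)) + (1 << powa)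
--     powa += 1
--     if numa == 0:
--         shift = powa
--     else:
--         shift = min((numa & -numa).bit_length() - 1, powa)
--     return (numa >> shift, powa - shift)
-- ===== Notes on version B (the rewrite author's own statement) =====
-- stated objective: alternative
-- what changed: The two merge branches collapse into one symmetric shift-to-max formula, and the bit-by-bit normalization while-loop is replaced by a closed-form trailing-zero count ((numa & -numa).bit_length() - 1, clamped to powa, with numa == 0 giving powa) followed by a single shift.
import Mathlib
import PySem

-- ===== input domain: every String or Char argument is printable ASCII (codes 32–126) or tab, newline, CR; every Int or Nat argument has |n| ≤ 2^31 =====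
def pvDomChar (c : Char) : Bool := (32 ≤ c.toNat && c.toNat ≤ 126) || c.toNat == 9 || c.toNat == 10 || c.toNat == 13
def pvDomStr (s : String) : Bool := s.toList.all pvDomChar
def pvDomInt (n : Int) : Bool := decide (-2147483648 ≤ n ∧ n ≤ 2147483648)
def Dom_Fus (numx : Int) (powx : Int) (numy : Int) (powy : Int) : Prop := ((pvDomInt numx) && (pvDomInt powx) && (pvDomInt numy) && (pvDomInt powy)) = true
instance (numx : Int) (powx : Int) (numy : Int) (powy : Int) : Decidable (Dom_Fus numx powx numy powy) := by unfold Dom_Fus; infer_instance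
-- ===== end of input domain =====

-- B replaces A's two-branch merge and bit-by-bit normalization loop by one symmetric
-- shift-to-max formula and a closed-form trailing-zero strip (alternative decomposition,
-- similar cost).

-- ===== PORT A =====
-- the 'while powa > 0 and (numa & 1) == 0' loop of A
def fusLoop (numa : Int) (powa : Int) : Int × Int :=
  if h : 0 < powa ∧ PySem.Int.band numa 1 = 0 then
    fusLoop (numa >>> (1 : Nat)) (powa - 1)
  else
    (numa, powa)
termination_by powa.toNat
decreasing_by omega

def Fus (numx : Int) (powx : Int) (numy : Int) (powy : Int) : Int × Int :=
  if powx ≥ powy then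
    fusLoop (numx + (numy <<< (powx - powy).toNat) + ((1 : Int) <<< powx.toNat)) (powx + 1)
  else
    fusLoop ((numx <<< (powy - powx).toNat) + numy + ((1 : Int) <<< powy.toNat)) (powy + 1)

-- ===== PORT B =====
def Fus_alt (numx : Int) (powx : Int) (numy : Int) (powy : Int) : Int × Int :=
  let powa0 := max powx powy
  let numa := (numx <<< (powa0 - powx).toNat) + (numy <<< (powa0 - powy).toNat)
                + ((1 : Int) <<< powa0.toNat)
  let powa := powa0 + 1
  let shift : Int :=
    if numa = 0 then powa
    else min ((PySem.Int.bitLength (PySem.Int.band numa (-numa)) : Int) - 1) powa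
  (numa >>> shift.toNat, powa - shift)

-- ===== PRECONDITION & SPEC =====
-- A raises (ValueError: negative shift count in '1 << powa') when both exponents are
-- negative; Pre_ admits exactly the inputs where A returns.
def Pre_Fus (numx : Int) (powx : Int) (numy : Int) (powy : Int) : Prop := 0 ≤ max powx powy
instance (numx : Int) (powx : Int) (numy : Int) (powy : Int) : Decidable (Pre_Fus numx powx numy powy) := by unfold Pre_Fus; infer_instance
def pvWitness_Fus : Int × Int × Int × Int := (3, 2, 5, 1)

def Spec_Fus (numx : Int) (powx : Int) (numy : Int) (powy : Int) (out : Int × Int) : Prop := out = Fus_alt numx powx numy powy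
instance (numx : Int) (powx : Int) (numy : Int) (powy : Int) (out : Int × Int) : Decidable (Spec_Fus numx powx numy powy out) := by unfold Spec_Fus; infer_instance

-- ===== CLAIM (what is proved, stated in full; the proofs are below) =====
def Claim_equal_Fus : Prop := ∀ (numx : Int) (powx : Int) (numy : Int) (powy : Int), Dom_Fus numx powx numy powy → Pre_Fus numx powx numy powy → Spec_Fus numx powx numy powy (Fus numx powx numy powy)

-- ===== LEMMAS AND PROOFS =====

-- Nat bit facts used to evaluate 'numa & -numa' on the two parities
theorem natAndEvenSucc (m : Nat) : (2 * m + 1) &&& (2 * m) = 2 * m := by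
  apply Nat.eq_of_testBit_eq
  intro i
  rw [Nat.testBit_land]
  cases i with
  | zero => simp [Nat.testBit_zero]
  | succ i =>
      simp only [Nat.testBit_succ]
      have h1 : (2 * m + 1) / 2 = m := by omega
      have h2 : (2 * m) / 2 = m := by omega
      rw [h1, h2, Bool.and_self]

theorem natAndPred (a : Nat) : (2 * a) &&& (2 * a - 1) = 2 * (a &&& (a - 1)) := by
  rcases Nat.eq_zero_or_pos a with h | h
  · subst h; simp
  apply Nat.eq_of_testBit_eq
  intro i
  rw [Nat.testBit_land]
  cases i with
  | zero =>
      simp [Nat.testBit_zero, Nat.mul_mod_right]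
  | succ i =>
      simp only [Nat.testBit_succ]
      have h1 : (2 * a) / 2 = a := by omega
      have h2 : (2 * a - 1) / 2 = a - 1 := by omega
      have h3 : (2 * (a &&& (a - 1))) / 2 = a &&& (a - 1) := by omega
      rw [h1, h2, h3, Nat.testBit_land]

theorem band_self_neg_odd (k : Int) : PySem.Int.band (2 * k + 1) (-(2 * k + 1)) = 1 := by
  rcases le_or_gt 0 k with hk | hk
  · have h1 : (0 : Int) ≤ 2 * k + 1 := by omega
    have h2 : ¬ (0 : Int) ≤ -(2 * k + 1) := by omega
    simp only [PySem.Int.band, h1, h2, if_true, if_false, if_pos, if_neg, not_false_iff]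
    have e1 : (2 * k + 1).toNat = 2 * k.toNat + 1 := by omega
    have e2 : (-(-(2 * k + 1)) - 1).toNat = 2 * k.toNat := by omega
    rw [e1, e2, natAndEvenSucc]; omega
  · have h1 : ¬ (0 : Int) ≤ 2 * k + 1 := by omega
    have h2 : (0 : Int) ≤ -(2 * k + 1) := by omega
    simp only [PySem.Int.band, h1, h2, if_true, if_false, if_pos, if_neg, not_false_iff]
    have e1 : (-(2 * k + 1)).toNat = 2 * (-k - 1).toNat + 1 := by omega
    have e2 : (-(2 * k + 1) - 1).toNat = 2 * (-k - 1).toNat := by omega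
    rw [e1, e2, natAndEvenSucc]; omega

theorem band_self_neg_even (k : Int) :
    PySem.Int.band (2 * k) (-(2 * k)) = 2 * PySem.Int.band k (-k) := by
  rcases lt_trichotomy k 0 with hk | hk | hk
  · have h1 : ¬ (0 : Int) ≤ 2 * k := by omega
    have h2 : (0 : Int) ≤ -(2 * k) := by omega
    have h3 : ¬ (0 : Int) ≤ k := by omega
    have h4 : (0 : Int) ≤ -k := by omega
    simp only [PySem.Int.band, h1, h2, h3, h4, if_true, if_false, if_pos, if_neg,
      not_false_iff]
    have e1 : (-(2 * k)).toNat = 2 * (-k).toNat := by omega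
    have e2 : (-(2 * k) - 1).toNat = 2 * (-k).toNat - 1 := by omega
    have e3 : (-k - 1).toNat = (-k).toNat - 1 := by omega
    rw [e1, e2, e3, natAndPred]
    have hle : (-k).toNat &&& ((-k).toNat - 1) ≤ (-k).toNat := Nat.and_le_left
    omega
  · subst hk; simp
  · have h1 : (0 : Int) ≤ 2 * k := by omega
    have h2 : ¬ (0 : Int) ≤ -(2 * k) := by omega
    have h3 : (0 : Int) ≤ k := by omega
    have h4 : ¬ (0 : Int) ≤ -k := by omega
    simp only [PySem.Int.band, h1, h2, h3, h4, if_true, if_false, if_pos, if_neg,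
      not_false_iff]
    have e1 : (2 * k).toNat = 2 * k.toNat := by omega
    have e2 : (-(-(2 * k)) - 1).toNat = 2 * k.toNat - 1 := by omega
    have e3 : (-(-k) - 1).toNat = k.toNat - 1 := by omega
    rw [e1, e2, e3, natAndPred]
    have hle : k.toNat &&& (k.toNat - 1) ≤ k.toNat := Nat.and_le_left
    omega

theorem mod_two_cases (n : Int) : PySem.Int.mod n 2 = 0 ∨ PySem.Int.mod n 2 = 1 := by
  unfold PySem.Int.mod
  rw [Int.fmod_eq_emod_of_nonneg _ (by norm_num)]
  omega

theorem band_pos_of_ne_zero (n : Int) (h : n ≠ 0) : 0 < PySem.Int.band n (-n) := by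
  have H : ∀ m : Nat, ∀ n : Int, n.natAbs = m → n ≠ 0 → 0 < PySem.Int.band n (-n) := by
    intro m
    induction m using Nat.strong_induction_on with
    | _ m ih =>
      intro n hm hn
      rcases Int.even_or_odd n with ⟨k, hk⟩ | ⟨k, hk⟩
      · have hk2 : n = 2 * k := by omega
        have hk0 : k ≠ 0 := by omega
        have hlt : k.natAbs < m := by omega
        have := ih k.natAbs hlt k rfl hk0
        rw [hk2, band_self_neg_even]; omega
      · rw [hk, band_self_neg_odd]; omega
  exact H n.natAbs n rfl h

theorem bitLength_pos (n : Int) (h : 0 < n) : 1 ≤ PySem.Int.bitLength n := by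
  rw [PySem.Int.bitLength_of_pos h]; omega

theorem bitLength_two_mul (x : Int) (h : 0 < x) :
    PySem.Int.bitLength (2 * x) = PySem.Int.bitLength x + 1 := by
  have h2 : (0 : Int) < 2 * x := by omega
  rw [PySem.Int.bitLength_of_pos h2]
  have : PySem.Int.floordiv (2 * x) 2 = x := by
    unfold PySem.Int.floordiv
    exact Int.mul_fdiv_cancel_left x (by norm_num)
  rw [this]

-- the shift B computes, as a function of the loop inputs
def shiftOf (numa : Int) (powa : Int) : Int :=
  if numa = 0 then powa
  else min ((PySem.Int.bitLength (PySem.Int.band numa (-numa)) : Int) - 1) powa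

theorem shiftOf_nonneg_sub (N P : Int) (hN : N ≠ 0) :
    0 ≤ (PySem.Int.bitLength (PySem.Int.band N (-N)) : Int) - 1 := by
  have := bitLength_pos _ (band_pos_of_ne_zero N hN)
  omega

theorem fusLoop_eq_shift (P : Int) (hP : 0 ≤ P) (N : Int) :
    fusLoop N P = (N >>> (shiftOf N P).toNat, P - shiftOf N P) := by
  have H : ∀ f : Nat, ∀ P N : Int, P.toNat = f → 0 ≤ P →
      fusLoop N P = (N >>> (shiftOf N P).toNat, P - shiftOf N P) := by
    intro f
    induction f using Nat.strong_induction_on with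
    | _ f ih =>
      intro P N hf hP
      rw [fusLoop]
      by_cases hc : 0 < P ∧ PySem.Int.band N 1 = 0
      · rw [dif_pos hc]
        obtain ⟨hPpos, hpar⟩ := hc
        rw [PySem.Int.band_one] at hpar
        have hdvd : (2 : Int) ∣ N := (PySem.Int.mod_eq_zero_iff_dvd N 2).mp hpar
        obtain ⟨k, hk⟩ := hdvd
        have hN1 : N >>> (1 : Nat) = k := by
          rw [Int.shiftRight_eq_div_pow]; omega
        by_cases hN0 : N = 0
        · -- N = 0 : the loop drains powa to 0
          subst hN0
          have hk0 : k = 0 := by omega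
          subst hk0
          have hz : (0 : Int) >>> (1 : Nat) = 0 := by decide
          rw [hz] at hN1 ⊢
          rw [ih (P - 1).toNat (by omega) (P - 1) 0 rfl (by omega)]
          have e1 : shiftOf 0 (P - 1) = P - 1 := by unfold shiftOf; simp
          have e2 : shiftOf 0 P = P := by unfold shiftOf; simp
          rw [e1, e2, Prod.mk.injEq]
          refine ⟨?_, by omega⟩
          rw [Int.shiftRight_eq_div_pow, Int.shiftRight_eq_div_pow]
          simp
        · -- N = 2k, k ≠ 0
          have hk0 : k ≠ 0 := by omega
          rw [hN1, ih (P - 1).toNat (by omega) (P - 1) k rfl (by omega)]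
          have hband : PySem.Int.band N (-N) = 2 * PySem.Int.band k (-k) := by
            rw [hk, show (2:Int)*k = 2*k from rfl]
            exact band_self_neg_even k
          have hbl : (PySem.Int.bitLength (PySem.Int.band N (-N)) : Int)
              = (PySem.Int.bitLength (PySem.Int.band k (-k)) : Int) + 1 := by
            rw [hband, bitLength_two_mul _ (band_pos_of_ne_zero k hk0)]
            push_cast; ring
          have hBk : 1 ≤ (PySem.Int.bitLength (PySem.Int.band k (-k)) : Int) :=
            by exact_mod_cast bitLength_pos _ (band_pos_of_ne_zero k hk0)
          unfold shiftOf
          rw [if_neg hN0, if_neg hk0]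
          set Bk : Int := (PySem.Int.bitLength (PySem.Int.band k (-k)) : Int) with hBkdef
          have hs : min ((PySem.Int.bitLength (PySem.Int.band N (-N)) : Int) - 1) P
              = min (Bk - 1) (P - 1) + 1 := by
            rw [hbl]; omega
          rw [hs]
          set s' : Int := min (Bk - 1) (P - 1) with hs'def
          have hs'0 : 0 ≤ s' := by omega
          rw [Prod.mk.injEq]
          refine ⟨?_, by omega⟩
          · rw [Int.shiftRight_eq_div_pow, Int.shiftRight_eq_div_pow]
            have hkN : k = N / 2 := by omega
            rw [hkN, Int.ediv_ediv_of_nonneg (by norm_num)]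
            congr 1
            have h1 : (s' + 1).toNat = s'.toNat + 1 := by omega
            rw [h1, pow_succ]
            push_cast
            ring
      · rw [dif_neg hc]
        by_cases hN0 : N = 0
        · -- N = 0 forces P = 0 here
          subst hN0
          have hP0 : P = 0 := by
            by_contra h
            exact hc ⟨by omega, by decide⟩
          subst hP0
          unfold shiftOf
          simp
        · -- the shift is 0: either N is odd (bitLength 1 = 1) or P = 0
          have hs0 : shiftOf N P = 0 := by
            unfold shiftOf
            rw [if_neg hN0]
            by_cases hodd : PySem.Int.band N 1 = 0
            · have hP0 : P = 0 := by
                by_contra h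
                exact hc ⟨by omega, hodd⟩
              have := shiftOf_nonneg_sub N P hN0
              omega
            · rw [PySem.Int.band_one] at hodd
              have h1 : PySem.Int.mod N 2 = 1 := by
                rcases mod_two_cases N with h | h
                · exact absurd h hodd
                · exact h
              have hNe : N % 2 = 1 := by
                rw [PySem.Int.mod, Int.fmod_eq_emod_of_nonneg _ (by norm_num)] at h1
                exact h1
              obtain ⟨k, hk⟩ : ∃ k : Int, N = 2 * k + 1 := ⟨(N - 1) / 2, by omega⟩
              rw [hk, band_self_neg_odd]
              have : PySem.Int.bitLength 1 = 1 := by decide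
              rw [this]
              omega
          rw [hs0]
          simp
  exact H P.toNat P N rfl hP

-- ===== VERDICT (by name: the statement is the Claim_ definition above) =====
theorem Fus_spec : Claim_equal_Fus := by
  intro numx powx numy powy _ hpre
  unfold Pre_Fus at hpre
  unfold Spec_Fus Fus Fus_alt
  by_cases h : powx ≥ powy
  · have hmax : max powx powy = powx := max_eq_left h
    have h0 : (powx - powx).toNat = 0 := by omega
    rw [if_pos h]
    simp only [hmax, h0, Int.shiftLeft_zero]
    rw [fusLoop_eq_shift (powx + 1) (by omega)]
    unfold shiftOf
    rfl
  · have h' : powy ≥ powx := by omega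
    have hmax : max powx powy = powy := max_eq_right h'
    have h0 : (powy - powy).toNat = 0 := by omega
    rw [if_neg h]
    simp only [hmax, h0, Int.shiftLeft_zero]
    rw [fusLoop_eq_shift (powy + 1) (by omega)]
    unfold shiftOf
    rfl
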